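-- pv_equiv track=rewrite | github.com/sdunatov/rosalind-pmfst | BA1E.py | FrequentWords1
-- ===== SOURCE A (Python) =====
-- def FrequentWords1(text, k, t):
--   frequentPatterns = []
--   d = dict()
--
--   for i in range(len(text) - k  + 1):
--     pattern = text[i:k+i]
--     if pattern in d:
--       d[pattern] = d[pattern] + 1
--     else:
--       d[pattern] = 1
--   for x in d.items():
--     if x[1] == t:
--       frequentPatterns.append(x[0])
--   return frequentPatterns
-- ===== SOURCE B (Python) =====
-- def FrequentWords1(text, k, t):
--     result = []
--     seen = set()
--     n = len(text)
--     for i in range(n - k + 1):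
--         pattern = text[i:i+k]
--         if pattern in seen:
--             continue
--         seen.add(pattern)
--         count = 0
--         for j in range(n - k + 1):
--             if text[j:j+k] == pattern:
--                 count += 1
--         if count == t:
--             result.append(pattern)
--     return result
-- ===== Notes on version B (the rewrite author's own statement) =====
-- stated objective: alternative
-- what changed: B drops A's count dictionary: it keeps a set of windows already examined and, for each new window, counts its overlapping occurrences by an inner rescan over all windows, appending it in first-occurrence order when the count equals t.
import Mathlib
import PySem

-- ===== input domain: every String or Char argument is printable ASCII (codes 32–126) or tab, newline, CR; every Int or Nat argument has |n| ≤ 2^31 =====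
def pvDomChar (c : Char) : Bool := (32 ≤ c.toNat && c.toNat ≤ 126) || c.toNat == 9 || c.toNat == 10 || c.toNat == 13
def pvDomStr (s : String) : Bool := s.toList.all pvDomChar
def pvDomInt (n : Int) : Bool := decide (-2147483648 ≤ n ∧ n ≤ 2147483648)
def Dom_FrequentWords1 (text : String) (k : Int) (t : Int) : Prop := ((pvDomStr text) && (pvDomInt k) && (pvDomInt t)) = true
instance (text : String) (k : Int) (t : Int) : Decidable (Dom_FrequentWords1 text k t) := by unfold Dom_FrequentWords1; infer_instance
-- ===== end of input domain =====

-- B replaces A's count dictionary by direct re-scanning: for each not-yet-seen window it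
-- counts its occurrences with an inner scan over all windows and appends it if the count
-- equals t (objective: alternative decomposition, no count dictionary; not faster).

-- ===== PORT A =====
def FrequentWords1 (text : String) (k : Int) (t : Int) : List String :=
  let d : PySem.Dict String Int :=
    (PySem.List.pyRange 0 (PySem.Str.len text - k + 1) 1).foldl
      (fun d i =>
        let pattern := PySem.Str.slice text (some i) (some (k + i))
        if d.contains pattern then d.insert pattern (d.getD pattern 0 + 1)
        else d.insert pattern 1)
      PySem.Dict.empty
  d.items.foldl (fun acc x => if x.2 == t then acc ++ [x.1] else acc) []

-- ===== PORT B =====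
def FrequentWords1_alt (text : String) (k : Int) (t : Int) : List String :=
  let n := PySem.Str.len text
  ((PySem.List.pyRange 0 (n - k + 1) 1).foldl
    (fun (st : List String × PySem.Set String) i =>
      let pattern := PySem.Str.slice text (some i) (some (i + k))
      if st.2.contains pattern then st
      else
        let seen := st.2.add pattern
        let count : Int :=
          (PySem.List.pyRange 0 (n - k + 1) 1).foldl
            (fun count j =>
              if PySem.Str.slice text (some j) (some (j + k)) == pattern then count + 1 else count)
            0
        if count == t then (st.1 ++ [pattern], seen) else (st.1, seen))
    ([], PySem.Set.empty)).1

-- ===== PRECONDITION & SPEC =====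
def Spec_FrequentWords1 (text : String) (k : Int) (t : Int) (out : List String) : Prop := out = FrequentWords1_alt text k t
instance (text : String) (k : Int) (t : Int) (out : List String) : Decidable (Spec_FrequentWords1 text k t out) := by unfold Spec_FrequentWords1; infer_instance

-- ===== CLAIM (what is proved, stated in full; the proofs are below) =====
def Claim_equal_FrequentWords1 : Prop := ∀ (text : String) (k : Int) (t : Int), Dom_FrequentWords1 text k t → Spec_FrequentWords1 text k t (FrequentWords1 text k t)

-- ===== LEMMAS AND PROOFS =====

-- the list of windows text[i:k+i] for i in range(m)
def pvWindows (text : String) (k m : Int) : List String :=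
  (PySem.List.pyRange 0 m 1).map (fun i => PySem.Str.slice text (some i) (some (k + i)))

-- B's seen-set loop over any list, started from the state of a processed prefix
theorem pv_bfold (c : String → Bool) (L : List String) : ∀ (pre : List String),
    L.foldl (fun (st : List String × PySem.Set String) p =>
        if st.2.contains p then st
        else
          let seen := st.2.add p
          if c p then (st.1 ++ [p], seen) else (st.1, seen))
      ((PySem.Set.ofList pre).filter c, PySem.Set.ofList pre)
    = ((PySem.Set.ofList (pre ++ L)).filter c, PySem.Set.ofList (pre ++ L)) := by
  induction L with
  | nil => intro pre; simp
  | cons p L ih =>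
    intro pre
    have hstep :
        (if (PySem.Set.ofList pre).contains p
          then (((PySem.Set.ofList pre).filter c, PySem.Set.ofList pre) : List String × PySem.Set String)
          else
            if c p then ((PySem.Set.ofList pre).filter c ++ [p], (PySem.Set.ofList pre).add p)
            else ((PySem.Set.ofList pre).filter c, (PySem.Set.ofList pre).add p))
        = ((PySem.Set.ofList (pre ++ [p])).filter c, PySem.Set.ofList (pre ++ [p])) := by
      rw [PySem.Set.ofList_append_singleton]
      by_cases hmem : p ∈ pre
      · have h1 : (PySem.Set.ofList pre).add p = PySem.Set.ofList pre := by
          simp [PySem.Set.add, PySem.Set.mem_ofList, hmem]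
        rw [h1]; simp [hmem]
      · have h1 : (PySem.Set.ofList pre).add p = PySem.Set.ofList pre ++ [p] := by
          simp [PySem.Set.add, PySem.Set.mem_ofList, hmem]
        by_cases hc : c p = true
        · rw [h1]; simp [hc, hmem, List.filter_append]
        · have hcf : c p = false := by simpa using hc
          rw [h1]; simp [hcf, hmem, List.filter_append]
    rw [List.foldl_cons]
    dsimp only
    rw [hstep, ih (pre ++ [p])]
    simp

-- A's counting step equals the canonical counter step
theorem pv_astep (d : PySem.Dict String Int) (p : String) :
    (if d.contains p then d.insert p (d.getD p 0 + 1) else d.insert p 1)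
    = d.insert p (d.getD p 0 + 1) := by
  by_cases h : d.contains p = true
  · simp [h]
  · have h' : d.contains p = false := by simpa using h
    rw [PySem.Dict.getD_of_not_contains d 0 h']
    simp [h']

-- A as filter of the deduplicated windows
theorem pv_A_eq (text : String) (k t : Int) :
    FrequentWords1 text k t
    = (PySem.Set.ofList (pvWindows text k (PySem.Str.len text - k + 1))).filter
        (fun p => ((pvWindows text k (PySem.Str.len text - k + 1)).count p : Int) == t) := by
  unfold FrequentWords1
  dsimp only
  set m := PySem.Str.len text - k + 1 with hm
  have hfold :
      (PySem.List.pyRange 0 m 1).foldl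
        (fun d i =>
          let pattern := PySem.Str.slice text (some i) (some (k + i))
          if d.contains pattern then d.insert pattern (d.getD pattern 0 + 1)
          else d.insert pattern 1)
        (PySem.Dict.empty : PySem.Dict String Int)
      = PySem.Dict.counter (pvWindows text k m) := by
    calc (PySem.List.pyRange 0 m 1).foldl
          (fun d i =>
            let pattern := PySem.Str.slice text (some i) (some (k + i))
            if d.contains pattern then d.insert pattern (d.getD pattern 0 + 1)
            else d.insert pattern 1)
          (PySem.Dict.empty : PySem.Dict String Int)
        = (PySem.List.pyRange 0 m 1).foldl
          (fun d i =>
            d.insert (PySem.Str.slice text (some i) (some (k + i)))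
              (d.getD (PySem.Str.slice text (some i) (some (k + i))) 0 + 1))
          (PySem.Dict.empty : PySem.Dict String Int) := by
          apply PySem.List.foldl_congr_mem
          intro d i _
          exact pv_astep d _
      _ = PySem.Dict.counter (pvWindows text k m) := by
          unfold pvWindows
          rw [← PySem.Dict.foldl_insert_getD_add_one_eq_counter, List.foldl_map]
  rw [hfold, PySem.Dict.items_counter, List.foldl_map,
    PySem.List.foldl_append_if (fun p => (((pvWindows text k m).count p : Int) == t)) (fun p => p)]
  simp

-- ===== VERDICT (by name: the statement is the Claim_ definition above) =====
theorem FrequentWords1_spec : Claim_equal_FrequentWords1 := by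
  intro text k t _
  unfold Spec_FrequentWords1
  set m := PySem.Str.len text - k + 1 with hm
  have hw : ∀ i : Int, PySem.Str.slice text (some i) (some (i + k))
      = PySem.Str.slice text (some i) (some (k + i)) := by
    intro i; rw [Int.add_comm]
  have hcnt : ∀ pattern : String,
      (PySem.List.pyRange 0 m 1).foldl
        (fun count j =>
          if PySem.Str.slice text (some j) (some (j + k)) == pattern then count + 1 else count)
        (0 : Int)
      = ((pvWindows text k m).count pattern : Int) := by
    intro pattern
    have h1 : (PySem.List.pyRange 0 m 1).foldl
        (fun count j =>
          if PySem.Str.slice text (some j) (some (j + k)) == pattern then count + 1 else count)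
        (0 : Int)
      = (pvWindows text k m).foldl
          (fun count p => if p == pattern then count + 1 else count) (0 : Int) := by
      unfold pvWindows
      rw [List.foldl_map]
      apply PySem.List.foldl_congr_mem
      intro c j _
      rw [hw j]
    rw [h1, PySem.List.foldl_count_if (fun p => p == pattern)]
    simp [List.count]
  have hA : (PySem.List.pyRange 0 m 1).foldl
      (fun (st : List String × PySem.Set String) i =>
        let pattern := PySem.Str.slice text (some i) (some (i + k))
        if st.2.contains pattern then st
        else
          let seen := st.2.add pattern
          let count : Int :=
            (PySem.List.pyRange 0 m 1).foldl
              (fun count j =>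
                if PySem.Str.slice text (some j) (some (j + k)) == pattern then count + 1 else count)
              0
          if count == t then (st.1 ++ [pattern], seen) else (st.1, seen))
      ([], PySem.Set.empty)
    = (PySem.List.pyRange 0 m 1).foldl
      (fun (st : List String × PySem.Set String) i =>
        if st.2.contains (PySem.Str.slice text (some i) (some (k + i))) then st
        else
          let seen := st.2.add (PySem.Str.slice text (some i) (some (k + i)))
          if (((pvWindows text k m).count (PySem.Str.slice text (some i) (some (k + i))) : Int) == t)
          then (st.1 ++ [PySem.Str.slice text (some i) (some (k + i))], seen) else (st.1, seen))
      ([], PySem.Set.empty) := by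
    apply PySem.List.foldl_congr_mem
    intro st i _
    simp only [hw i, hcnt]
  have hB : ∀ c : String → Bool, (PySem.List.pyRange 0 m 1).foldl
      (fun (st : List String × PySem.Set String) i =>
        if st.2.contains (PySem.Str.slice text (some i) (some (k + i))) then st
        else
          let seen := st.2.add (PySem.Str.slice text (some i) (some (k + i)))
          if c (PySem.Str.slice text (some i) (some (k + i)))
          then (st.1 ++ [PySem.Str.slice text (some i) (some (k + i))], seen) else (st.1, seen))
      ([], PySem.Set.empty)
    = (pvWindows text k m).foldl
      (fun (st : List String × PySem.Set String) p =>
        if st.2.contains p then st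
        else
          let seen := st.2.add p
          if c p then (st.1 ++ [p], seen) else (st.1, seen))
      ([], PySem.Set.empty) := by
    intro c
    unfold pvWindows
    rw [List.foldl_map]
  have hb := pv_bfold
    (fun p => (((pvWindows text k m).count p : Int) == t)) (pvWindows text k m) []
  have h0 : (((PySem.Set.ofList ([] : List String)).filter
        (fun p => (((pvWindows text k m).count p : Int) == t))),
      PySem.Set.ofList ([] : List String))
      = (([] : List String), (PySem.Set.empty : PySem.Set String)) := by
    simp [PySem.Set.empty]
  rw [h0, List.nil_append] at hb
  have hpair := (hA.trans
    (hB (fun p => (((pvWindows text k m).count p : Int) == t)))).trans hb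
  have key : ((PySem.List.pyRange 0 m 1).foldl
      (fun (st : List String × PySem.Set String) i =>
        let pattern := PySem.Str.slice text (some i) (some (i + k))
        if st.2.contains pattern then st
        else
          let seen := st.2.add pattern
          let count : Int :=
            (PySem.List.pyRange 0 m 1).foldl
              (fun count j =>
                if PySem.Str.slice text (some j) (some (j + k)) == pattern then count + 1 else count)
              0
          if count == t then (st.1 ++ [pattern], seen) else (st.1, seen))
      ([], PySem.Set.empty)).1
    = FrequentWords1 text k t := by
    rw [hpair, pv_A_eq, hm]
  exact key.symm
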